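-- pv_equiv track=rewrite | github.com/brendabaek/leetcode_s | 202503/20250307_2432.py | hardestWorker
-- ===== SOURCE A (Python) =====
-- from typing import List
--
-- def hardestWorker(n: int, logs: List[List[int]]) -> int:
--     p, lst = 0, []
--     for log in logs :
--         lst.append(log[1]-p)
--         p = log[1]
--     m, ans = max(lst), []
--     for i, v in enumerate(lst) :
--         if v == m : ans.append(logs[i][0])
--     return min(ans)
-- ===== SOURCE B (Python) =====
-- def hardestWorker(n, logs):
--     if not logs:
--         raise ValueError("logs must be non-empty")
--     p = 0
--     best_d = best_id = None
--     for log in logs: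
--         d = log[1] - p
--         p = log[1]
--         if best_d is None or d > best_d or (d == best_d and log[0] < best_id):
--             best_d, best_id = d, log[0]
--     return best_id
-- ===== Notes on version B (the rewrite author's own statement) =====
-- stated objective: simpler
-- what changed: A builds the full duration list, takes max, collects all tying ids in a second pass and takes min; B is a single fold over logs keeping the running (best duration, smallest id) pair.
import Mathlib
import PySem

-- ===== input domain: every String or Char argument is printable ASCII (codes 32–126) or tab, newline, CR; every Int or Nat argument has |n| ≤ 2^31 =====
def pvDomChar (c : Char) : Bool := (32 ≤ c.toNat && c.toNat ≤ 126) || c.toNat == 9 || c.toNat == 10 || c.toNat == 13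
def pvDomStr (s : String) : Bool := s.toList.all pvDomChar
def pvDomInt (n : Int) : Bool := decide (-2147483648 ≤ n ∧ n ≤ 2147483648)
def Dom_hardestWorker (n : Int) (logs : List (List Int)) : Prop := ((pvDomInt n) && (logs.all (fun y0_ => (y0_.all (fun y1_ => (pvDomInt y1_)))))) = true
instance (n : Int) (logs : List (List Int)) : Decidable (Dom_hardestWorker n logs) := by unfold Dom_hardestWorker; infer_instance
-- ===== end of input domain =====

-- B replaces A's three passes (duration list, max, filter+min over ties) by a single
-- running-best fold tracking (longest duration, smallest id among ties); objective: simpler.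

-- ===== PORT A =====
def hardestWorker (n : Int) (logs : List (List Int)) : Int :=
  -- p, lst = 0, []; for log in logs: lst.append(log[1]-p); p = log[1]
  let st := logs.foldl (fun (st : Int × List Int) log =>
      (PySem.List.pyGetD log 1 0, st.2 ++ [PySem.List.pyGetD log 1 0 - st.1])) (0, [])
  let lst := st.2
  -- m = max(lst)
  let m := (PySem.List.max? lst (fun v => v)).getD 0
  -- ans = []; for i, v in enumerate(lst): if v == m: ans.append(logs[i][0])
  let ans := (PySem.List.enumerate lst 0).foldl (fun acc iv =>
      if iv.2 = m then acc ++ [PySem.List.pyGetD (PySem.List.pyGetD logs iv.1 []) 0 0] else acc) []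
  -- return min(ans)
  (PySem.List.min? ans (fun v => v)).getD 0

-- ===== PORT B =====
def hardestWorker_alt (n : Int) (logs : List (List Int)) : Int :=
  -- p = 0; best = None; for log in logs: d = log[1]-p; p = log[1]; update best
  let st := logs.foldl (fun (st : Int × Option (Int × Int)) log =>
      let t := PySem.List.pyGetD log 1 0
      let w := PySem.List.pyGetD log 0 0
      let d := t - st.1
      let best := match st.2 with
        | none => some (d, w)
        | some (bd, bw) => if bd < d ∨ (d = bd ∧ w < bw) then some (d, w) else some (bd, bw)
      (t, best)) (0, none)
  match st.2 with
  | some b => b.2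
  | none => 0   -- unreachable under Pre_ (Python raises ValueError on empty logs)

-- ===== PRECONDITION & SPEC =====
-- Pre_ excludes exactly the inputs where the Python A raises: empty logs (max([]) is a
-- ValueError; B raises there too) and rows shorter than 2 (log[1] is an IndexError).
def Pre_hardestWorker (n : Int) (logs : List (List Int)) : Prop :=
  logs ≠ [] ∧ ∀ log ∈ logs, 2 ≤ log.length
instance (n : Int) (logs : List (List Int)) : Decidable (Pre_hardestWorker n logs) := by
  unfold Pre_hardestWorker; infer_instance
def pvWitness_hardestWorker : Int × List (List Int) := (2, [[1, 3], [0, 5]])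

def Spec_hardestWorker (n : Int) (logs : List (List Int)) (out : Int) : Prop := out = hardestWorker_alt n logs
instance (n : Int) (logs : List (List Int)) (out : Int) : Decidable (Spec_hardestWorker n logs out) := by unfold Spec_hardestWorker; infer_instance

-- ===== CLAIM (what is proved, stated in full; the proofs are below) =====
def Claim_equal_hardestWorker : Prop := ∀ (n : Int) (logs : List (List Int)), Dom_hardestWorker n logs → Pre_hardestWorker n logs → Spec_hardestWorker n logs (hardestWorker n logs)

-- ===== LEMMAS AND PROOFS =====

-- the (duration, id) pair stream both loops traverse
def pvPairs (p : Int) (logs : List (List Int)) : List (Int × Int) :=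
  match logs with
  | [] => []
  | log :: rest =>
      (PySem.List.pyGetD log 1 0 - p, PySem.List.pyGetD log 0 0) :: pvPairs (PySem.List.pyGetD log 1 0) rest

-- B's tie-breaking combiner
def pvComb (b q : Int × Int) : Int × Int :=
  if b.1 < q.1 ∨ (q.1 = b.1 ∧ q.2 < b.2) then q else b

theorem pv_foldA (logs : List (List Int)) : ∀ (p : Int) (acc : List Int),
    (logs.foldl (fun (st : Int × List Int) log =>
      (PySem.List.pyGetD log 1 0, st.2 ++ [PySem.List.pyGetD log 1 0 - st.1])) (p, acc)).2
    = acc ++ (pvPairs p logs).map Prod.fst := by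
  induction logs with
  | nil => simp [pvPairs]
  | cons log rest ih =>
      intro p acc
      simp only [List.foldl_cons, pvPairs, List.map_cons]
      rw [ih]
      simp

theorem pv_foldB_some (ps : List (Int × Int)) : ∀ (b : Int × Int),
    ps.foldl (fun (o : Option (Int × Int)) q =>
        match o with
        | none => some q
        | some (bd, bw) => if bd < q.1 ∨ (q.1 = bd ∧ q.2 < bw) then some q else some (bd, bw))
      (some b)
    = some (ps.foldl pvComb b) := by
  induction ps with
  | nil => intro b; rfl
  | cons q rest ih =>
      intro b
      simp only [List.foldl_cons]
      have hstep : (if b.1 < q.1 ∨ (q.1 = b.1 ∧ q.2 < b.2) then some q else some (b.1, b.2))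
          = some (pvComb b q) := by
        unfold pvComb; split <;> simp
      rw [hstep, ih]

theorem pv_foldB (logs : List (List Int)) : ∀ (p : Int) (o : Option (Int × Int)),
    (logs.foldl (fun (st : Int × Option (Int × Int)) log =>
      let t := PySem.List.pyGetD log 1 0
      let w := PySem.List.pyGetD log 0 0
      let d := t - st.1
      let best := match st.2 with
        | none => some (d, w)
        | some (bd, bw) => if bd < d ∨ (d = bd ∧ w < bw) then some (d, w) else some (bd, bw)
      (t, best)) (p, o)).2
    = (pvPairs p logs).foldl (fun (o : Option (Int × Int)) q =>
        match o with
        | none => some q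
        | some (bd, bw) => if bd < q.1 ∨ (q.1 = bd ∧ q.2 < bw) then some q else some (bd, bw)) o := by
  induction logs with
  | nil => intro p o; rfl
  | cons log rest ih => intro p o; simpa [pvPairs] using ih (PySem.List.pyGetD log 1 0) _

-- running best is a member of the stream
theorem pv_best_mem (ps : List (Int × Int)) : ∀ (b : Int × Int),
    ps.foldl pvComb b = b ∨ ps.foldl pvComb b ∈ ps := by
  induction ps with
  | nil => intro b; left; rfl
  | cons q rest ih =>
      intro b
      simp only [List.foldl_cons]
      rcases ih (pvComb b q) with h | h
      · rw [h]; unfold pvComb; split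
        · right; exact List.mem_cons_self
        · left; rfl
      · right; exact List.mem_cons_of_mem _ h

-- running best dominates every duration
theorem pv_best_max (ps : List (Int × Int)) : ∀ (b : Int × Int),
    b.1 ≤ (ps.foldl pvComb b).1 ∧ ∀ q ∈ ps, q.1 ≤ (ps.foldl pvComb b).1 := by
  induction ps with
  | nil => intro b; exact ⟨le_refl _, by simp⟩
  | cons q rest ih =>
      intro b
      simp only [List.foldl_cons]
      obtain ⟨h1, h2⟩ := ih (pvComb b q)
      have hc : b.1 ≤ (pvComb b q).1 ∧ q.1 ≤ (pvComb b q).1 := by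
        unfold pvComb; split <;> constructor <;> omega
      refine ⟨le_trans hc.1 h1, ?_⟩
      intro r hr
      rcases List.mem_cons.1 hr with rfl | hr
      · exact le_trans hc.2 h1
      · exact h2 r hr

-- among ties the running best has the smallest id
theorem pv_best_min (ps : List (Int × Int)) : ∀ (b : Int × Int),
    (b.1 = (ps.foldl pvComb b).1 → (ps.foldl pvComb b).2 ≤ b.2) ∧
    ∀ q ∈ ps, q.1 = (ps.foldl pvComb b).1 → (ps.foldl pvComb b).2 ≤ q.2 := by
  induction ps with
  | nil => intro b; exact ⟨fun _ => le_refl _, by simp⟩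
  | cons q rest ih =>
      intro b
      simp only [List.foldl_cons]
      obtain ⟨h1, h2⟩ := ih (pvComb b q)
      have hmax := (pv_best_max rest (pvComb b q)).1
      have hcb : b.1 ≤ (pvComb b q).1 ∧ (b.1 = (pvComb b q).1 → (pvComb b q).2 ≤ b.2) := by
        unfold pvComb; split <;> constructor <;> omega
      have hcq : q.1 ≤ (pvComb b q).1 ∧ (q.1 = (pvComb b q).1 → (pvComb b q).2 ≤ q.2) := by
        unfold pvComb; split <;> constructor <;> omega
      refine ⟨fun hb => ?_, fun r hr => ?_⟩
      · have he : (pvComb b q).1 = (rest.foldl pvComb (pvComb b q)).1 := by omega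
        exact le_trans (h1 he) (hcb.2 (by omega))
      · rcases List.mem_cons.1 hr with rfl | hr
        · intro hq
          have he : (pvComb b r).1 = (rest.foldl pvComb (pvComb b r)).1 := by omega
          exact le_trans (h1 he) (hcq.2 (by omega))
        · exact h2 r hr

-- A's second loop (over enumerate(lst)) collects the ids of the max-duration entries
theorem pv_enumFold (m : Int) (logs2 : List (List Int)) : ∀ (pre : List (List Int)) (p : Int) (acc : List Int),
    (PySem.List.enumerate ((pvPairs p logs2).map Prod.fst) ((pre.length : Nat) : Int)).foldl
      (fun acc iv => if iv.2 = m then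
          acc ++ [PySem.List.pyGetD (PySem.List.pyGetD (pre ++ logs2) iv.1 ([] : List Int)) 0 0]
        else acc) acc
    = acc ++ ((pvPairs p logs2).filter (fun pr => decide (pr.1 = m))).map Prod.snd := by
  induction logs2 with
  | nil => intro pre p acc; simp [pvPairs]
  | cons log rest ih =>
      intro pre p acc
      simp only [pvPairs, List.map_cons, PySem.List.enumerate_cons, List.foldl_cons]
      have hlog : PySem.List.pyGetD (pre ++ log :: rest) ((pre.length : Nat) : Int) ([] : List Int) = log := by
        rw [PySem.List.pyGetD_natCast]; simp [List.getD]
      rw [hlog]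
      have hlen : ((pre.length : Nat) : Int) + 1 = (((pre ++ [log]).length : Nat) : Int) := by
        simp
      have happ : pre ++ log :: rest = (pre ++ [log]) ++ rest := by simp
      rw [hlen, happ, ih (pre ++ [log]) (PySem.List.pyGetD log 1 0)]
      by_cases h : PySem.List.pyGetD log 1 0 - p = m <;> simp [h]

theorem pv_foldA0 (logs : List (List Int)) :
    (logs.foldl (fun (st : Int × List Int) log =>
      (PySem.List.pyGetD log 1 0, st.2 ++ [PySem.List.pyGetD log 1 0 - st.1])) (0, [])).2
    = (pvPairs 0 logs).map Prod.fst := by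
  rw [pv_foldA]; rw [List.nil_append]

theorem pv_enumFold0 (m : Int) (logs : List (List Int)) :
    (PySem.List.enumerate ((pvPairs 0 logs).map Prod.fst) 0).foldl
      (fun acc iv => if iv.2 = m then
          acc ++ [PySem.List.pyGetD (PySem.List.pyGetD logs iv.1 ([] : List Int)) 0 0]
        else acc) []
    = ((pvPairs 0 logs).filter (fun pr => decide (pr.1 = m))).map Prod.snd := by
  have h := pv_enumFold m logs [] 0 []
  simpa using h

-- ===== VERDICT (by name: the statement is the Claim_ definition above) =====
theorem hardestWorker_spec : Claim_equal_hardestWorker := by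
  intro n logs _ hpre
  obtain ⟨hne, -⟩ := hpre
  unfold Spec_hardestWorker hardestWorker hardestWorker_alt
  simp only []
  rw [pv_foldA0, pv_foldB]
  obtain ⟨pr, prs, hps⟩ : ∃ pr prs, pvPairs 0 logs = pr :: prs := by
    cases logs with
    | nil => exact absurd rfl hne
    | cons log rest => exact ⟨_, _, rfl⟩
  rw [pv_enumFold0, hps]
  have hB : (pr :: prs).foldl (fun (o : Option (Int × Int)) q =>
        match o with
        | none => some q
        | some (bd, bw) => if bd < q.1 ∨ (q.1 = bd ∧ q.2 < bw) then some q else some (bd, bw)) none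
      = some (prs.foldl pvComb pr) := by
    rw [List.foldl_cons]; exact pv_foldB_some prs pr
  rw [hB]
  simp only [List.map_cons, PySem.List.max?_id_cons, Option.getD_some]
  set M := (prs.map Prod.fst).foldl max pr.1 with hM
  set B2 := prs.foldl pvComb pr with hB2
  set ans := ((pr :: prs).filter (fun q => decide (q.1 = M))).map Prod.snd with hans
  have hmaxfacts := PySem.List.le_foldl_max (prs.map Prod.fst) pr.1
  have hmaxmem := PySem.List.foldl_max_mem (prs.map Prod.fst) pr.1
  have hballmax : ∀ q ∈ pr :: prs, q.1 ≤ B2.1 := by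
    intro q hq
    rcases List.mem_cons.1 hq with rfl | hq
    · exact (pv_best_max prs q).1
    · exact (pv_best_max prs pr).2 q hq
  have hBmem : B2 ∈ pr :: prs := by
    rcases pv_best_mem prs pr with h | h
    · rw [hB2, h]; exact List.mem_cons_self
    · exact List.mem_cons_of_mem _ h
  have hB2M : B2.1 = M := by
    have h1 : B2.1 ≤ M := by
      rcases List.mem_cons.1 hBmem with heq | h
      · rw [heq]; exact hmaxfacts.1
      · exact hmaxfacts.2 B2.1 (List.mem_map_of_mem h)
    have h2 : M ≤ B2.1 := by
      rcases hmaxmem with h | h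
      · rw [hM, h]; exact hballmax pr List.mem_cons_self
      · obtain ⟨q, hq, hq1⟩ := List.mem_map.1 h
        rw [hM, ← hq1]; exact hballmax q (List.mem_cons_of_mem _ hq)
    omega
  have hB2ans : B2.2 ∈ ans := List.mem_map_of_mem (List.mem_filter.2 ⟨hBmem, by simp [hB2M]⟩)
  cases hI : PySem.List.min? ans (fun v => v) with
  | none =>
      rw [(PySem.List.min?_eq_none_iff ans (fun v => v)).1 hI] at hB2ans
      cases hB2ans
  | some I =>
      simp only [Option.getD_some]
      have hIans := PySem.List.min?_mem hI
      have hImin := PySem.List.min?_isMin hI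
      have h1 : I ≤ B2.2 := hImin B2.2 hB2ans
      obtain ⟨q, hqf, hq2⟩ := List.mem_map.1 hIans
      have hqmem := (List.mem_filter.1 hqf).1
      have hqM : q.1 = M := by simpa using (List.mem_filter.1 hqf).2
      have h2 : B2.2 ≤ I := by
        rw [← hq2]
        rcases List.mem_cons.1 hqmem with rfl | h
        · exact (pv_best_min prs q).1 (by rw [← hB2]; omega)
        · exact (pv_best_min prs pr).2 q h (by rw [← hB2]; omega)
      omega
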